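-- pv_equiv track=rewrite | github.com/hyemi0622/algorithm | Week_Solutions/1Week/Problem3/Problem3nsy.py | solution
-- ===== SOURCE A (Python) =====
-- def solution(l, r):
--     answer = []
--     blist = [5*int(bin(i)[2:]) for i in range(64)]
--     for i in blist:
--         if (l <= i) and (i <= r):
--             answer += [i]
--     if len(answer) == 0:
--         answer = [-1]
--     return answer
-- ===== SOURCE B (Python) =====
-- BLIST = [5 * int(bin(i)[2:]) for i in range(64)]  # strictly increasing
--
--
-- def _bsearch(a, lo, hi, below):
--     # smallest index in [lo, hi] whose element does not satisfy `below`
--     while lo < hi: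
--         mid = (lo + hi) // 2
--         if below(a[mid]):
--             lo = mid + 1
--         else:
--             hi = mid
--     return lo
--
--
-- def solution(l, r):
--     left = _bsearch(BLIST, 0, 64, lambda v: v < l)
--     right = _bsearch(BLIST, 0, 64, lambda v: v <= r)
--     ans = BLIST[left:right]
--     return ans if ans else [-1]
-- ===== Notes on version B (the rewrite author's own statement) =====
-- stated objective: alternative
-- what changed: B precomputes the sorted 64-element pattern list once at module level and finds the answer block with two hand-written binary searches plus a slice, instead of A's per-call list rebuild and linear scan appending matches one by one.
import Mathlib
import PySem

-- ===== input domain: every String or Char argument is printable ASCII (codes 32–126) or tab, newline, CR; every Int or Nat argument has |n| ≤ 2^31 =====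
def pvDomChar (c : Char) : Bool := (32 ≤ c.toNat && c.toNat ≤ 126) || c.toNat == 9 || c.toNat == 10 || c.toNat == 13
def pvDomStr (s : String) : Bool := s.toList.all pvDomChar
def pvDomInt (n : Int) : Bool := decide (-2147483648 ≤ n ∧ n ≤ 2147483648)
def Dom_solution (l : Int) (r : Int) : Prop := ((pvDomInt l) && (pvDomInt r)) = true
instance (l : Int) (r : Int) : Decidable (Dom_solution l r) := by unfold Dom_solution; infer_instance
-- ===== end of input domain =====

-- B replaces A's linear scan of the 64-element sorted list by two hand-written
-- binary searches and a slice (objective: alternative algorithm; same overall cost).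

-- ===== PORT A =====
-- int(bin(i)[2:]) for i ≥ 0: the decimal number whose digits are i's binary digits.
-- Fuel-based structural recursion (fuel = n suffices since n/2 < n); exact for n ≥ 0.
def pyBinFuel : Nat → Nat → Int
  | _, 0 => 0
  | 0, _ + 1 => 0    -- unreachable: fuel n never runs out before n reaches 0
  | f + 1, n + 1 => 10 * pyBinFuel f ((n + 1) / 2) + ((n + 1) % 2 : Nat)

def pyBin (n : Nat) : Int := pyBinFuel n n

def solution (l : Int) (r : Int) : List Int :=
  -- blist = [5*int(bin(i)[2:]) for i in range(64)]
  let blist : List Int := (PySem.List.pyRange 0 64 1).map (fun i => 5 * pyBin i.toNat)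
  -- for i in blist: if (l <= i) and (i <= r): answer += [i]
  let answer := blist.foldl (fun acc i => if l ≤ i ∧ i ≤ r then acc ++ [i] else acc) []
  if answer.length = 0 then [-1] else answer

-- ===== PORT B =====
def blistB : List Int := (PySem.List.pyRange 0 64 1).map (fun i => 5 * pyBin i.toNat)

-- _bsearch's while loop; fuel = hi - lo bounds its iterations (each step shrinks hi - lo).
-- a[mid] is always in range here (lo < hi ≤ len a at every call in solution_alt).
def bsearchLoop (a : List Int) (below : Int → Bool) : Nat → Nat → Nat → Nat
  | 0, lo, _ => lo
  | f + 1, lo, hi =>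
    if lo < hi then
      let mid := (lo + hi) / 2
      if below (a.getD mid 0) then bsearchLoop a below f (mid + 1) hi
      else bsearchLoop a below f lo mid
    else lo

def bsearch (a : List Int) (lo hi : Nat) (below : Int → Bool) : Nat :=
  bsearchLoop a below (hi - lo) lo hi

def solution_alt (l : Int) (r : Int) : List Int :=
  let left := bsearch blistB 0 64 (fun v => v < l)
  let right := bsearch blistB 0 64 (fun v => v ≤ r)
  let ans := PySem.List.slice blistB (some (left : Int)) (some (right : Int))
  if ans.isEmpty then [-1] else ans

-- ===== PRECONDITION & SPEC =====
def Spec_solution (l : Int) (r : Int) (out : List Int) : Prop := out = solution_alt l r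
instance (l : Int) (r : Int) (out : List Int) : Decidable (Spec_solution l r out) := by unfold Spec_solution; infer_instance

-- ===== CLAIM (what is proved, stated in full; the proofs are below) =====
def Claim_equal_solution : Prop := ∀ (l : Int) (r : Int), Dom_solution l r → Spec_solution l r (solution l r)

-- ===== LEMMAS AND PROOFS =====

-- A's loop is a filter.
theorem foldl_filter (l r : Int) (bs : List Int) (acc : List Int) :
    bs.foldl (fun acc i => if l ≤ i ∧ i ≤ r then acc ++ [i] else acc) acc
      = acc ++ bs.filter (fun i => decide (l ≤ i ∧ i ≤ r)) := by
  induction bs generalizing acc with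
  | nil => simp
  | cons x t ih =>
    simp only [List.foldl_cons, List.filter_cons]
    by_cases h : l ≤ x ∧ x ≤ r
    · simp [h, ih]
    · simp [h, ih]

-- On a sorted list, a downward-closed Boolean predicate holds at index k iff k is below
-- the takeWhile frontier.
theorem takeWhile_char (q : Int → Bool) (mono : ∀ x y : Int, x ≤ y → q y = true → q x = true)
    (bs : List Int) (hs : bs.Pairwise (· ≤ ·)) (k : Nat) (hk : k < bs.length) :
    q (bs.getD k 0) = true ↔ k < (bs.takeWhile q).length := by
  induction bs generalizing k with
  | nil => simp at hk
  | cons x t ih =>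
    rcases List.pairwise_cons.mp hs with ⟨hx, ht⟩
    cases k with
    | zero =>
      cases hq : q x <;> simp [hq]
    | succ k =>
      simp only [List.length_cons, Nat.succ_lt_succ_iff] at hk
      have hget : (x :: t).getD (k + 1) 0 = t.getD k 0 := by simp
      cases hq : q x with
      | true =>
        rw [hget]
        simp only [List.takeWhile_cons, hq, if_true, List.length_cons,
          Nat.succ_lt_succ_iff]
        exact ih ht k hk
      | false =>
        have hlen : ((x :: t).takeWhile q).length = 0 := by
          simp [hq]
        rw [hget, hlen]
        constructor
        · intro hqt
          exfalso
          have hmem : t.getD k 0 ∈ t := by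
            rw [List.getD_eq_getElem _ _ hk]; exact List.getElem_mem hk
          have : q x = true := mono x _ (hx _ hmem) hqt
          simp [hq] at this
        · omega

-- bsearchLoop computes the takeWhile frontier whenever it is bracketed by [lo, hi].
theorem bsearchLoop_spec (a : List Int) (q : Int → Bool)
    (mono : ∀ x y : Int, x ≤ y → q y = true → q x = true)
    (hs : a.Pairwise (· ≤ ·)) :
    ∀ (fuel lo hi : Nat), hi - lo ≤ fuel → hi ≤ a.length →
      lo ≤ (a.takeWhile q).length → (a.takeWhile q).length ≤ hi →
      bsearchLoop a q fuel lo hi = (a.takeWhile q).length := by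
  intro fuel
  induction fuel with
  | zero => intro lo hi hf _ h1 h2; simp only [bsearchLoop]; omega
  | succ f ih =>
    intro lo hi hf hhi h1 h2
    simp only [bsearchLoop]
    by_cases hlt : lo < hi
    · simp only [hlt, if_true]
      have hmid : (lo + hi) / 2 < a.length := by omega
      have hchar := takeWhile_char q mono a hs ((lo + hi) / 2) hmid
      cases hq : q (a.getD ((lo + hi) / 2) 0) with
      | true =>
        have : (lo + hi) / 2 < (a.takeWhile q).length := hchar.mp hq
        exact ih ((lo + hi) / 2 + 1) hi (by omega) hhi (by omega) h2
      | false =>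
        have hnot : ¬ (lo + hi) / 2 < (a.takeWhile q).length := by
          intro h
          have h3 : q (a.getD ((lo + hi) / 2) 0) = true := hchar.mpr h
          rw [hq] at h3
          cases h3
        exact ih lo ((lo + hi) / 2) (by omega) (by omega) h1 (by omega)
    · simp only [hlt, if_false]; omega

-- On a sorted list the interval filter is the block between the two frontiers.
theorem filter_eq_take_drop (l r : Int) (bs : List Int) (hs : bs.Pairwise (· ≤ ·)) :
    bs.filter (fun i => decide (l ≤ i ∧ i ≤ r))
      = (bs.take (bs.takeWhile (fun v => v ≤ r)).length).drop
          (bs.takeWhile (fun v => v < l)).length := by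
  induction bs with
  | nil => simp
  | cons x t ih =>
    rcases List.pairwise_cons.mp hs with ⟨hx, ht⟩
    by_cases hr : x ≤ r
    · by_cases hl : l ≤ x
      · -- x kept; no element of the takeWhile(< l) frontier
        have hlfr : ((x :: t).takeWhile (fun v => decide (v < l))).length = 0 := by
          simp [show ¬ x < l by omega]
        have htl : (t.takeWhile (fun v => decide (v < l))).length = 0 := by
          cases t with
          | nil => simp
          | cons y u =>
            have : l ≤ y := le_trans hl (hx y (by simp))
            simp [show ¬ y < l by omega]
        simp only [List.filter_cons, List.takeWhile_cons]
        simp only [show decide (l ≤ x ∧ x ≤ r) = true by simp [hl, hr],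
          show decide (x ≤ r) = true by simp [hr], if_true, List.length_cons]
        simp only [show ¬ x < l by omega, decide_false]
        simp only [List.take_succ_cons]
        rw [ih ht, htl]
        simp
      · -- x < l: both frontiers shift by one (x ≤ r and x < l)
        simp only [List.filter_cons, List.takeWhile_cons]
        simp only [show decide (l ≤ x ∧ x ≤ r) = false by simp [hl],
          show decide (x ≤ r) = true by simp [hr],
          show decide (x < l) = true by simp; omega, if_true, List.length_cons]
        simp only [List.take_succ_cons, List.drop_succ_cons]
        exact ih ht
    · -- r < x: everything from here on exceeds r; filter is empty
      have hfil : (x :: t).filter (fun i => decide (l ≤ i ∧ i ≤ r)) = [] := by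
        rw [List.filter_eq_nil_iff]
        intro y hy
        have : r < y := by
          rcases List.mem_cons.mp hy with h | h
          · omega
          · exact lt_of_lt_of_le (by omega : r < x) (hx y h)
        simp; omega
      simp only [List.takeWhile_cons, show decide (x ≤ r) = false by simp [hr], hfil]
      simp

theorem blistB_sorted : blistB.Pairwise (· ≤ ·) := by decide
theorem blistB_len : blistB.length = 64 := by decide

theorem mono_lt (l : Int) : ∀ x y : Int, x ≤ y → decide (y < l) = true → decide (x < l) = true := by
  intro x y h hy; simp at hy ⊢; omega

theorem mono_le (r : Int) : ∀ x y : Int, x ≤ y → decide (y ≤ r) = true → decide (x ≤ r) = true := by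
  intro x y h hy; simp at hy ⊢; omega

theorem solution_alt_eq (l r : Int) :
    solution_alt l r =
      (if ((blistB.take (blistB.takeWhile (fun v => v ≤ r)).length).drop
            (blistB.takeWhile (fun v => v < l)).length).isEmpty then [-1]
       else (blistB.take (blistB.takeWhile (fun v => v ≤ r)).length).drop
            (blistB.takeWhile (fun v => v < l)).length) := by
  have hL : bsearch blistB 0 64 (fun v => v < l)
      = (blistB.takeWhile (fun v => decide (v < l))).length := by
    unfold bsearch
    exact bsearchLoop_spec blistB _ (mono_lt l) blistB_sorted 64 0 64 (by omega)
      (by rw [blistB_len]) (by omega)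
      (le_trans (List.takeWhile_prefix _).length_le (by rw [blistB_len]))
  have hR : bsearch blistB 0 64 (fun v => v ≤ r)
      = (blistB.takeWhile (fun v => decide (v ≤ r))).length := by
    unfold bsearch
    exact bsearchLoop_spec blistB _ (mono_le r) blistB_sorted 64 0 64 (by omega)
      (by rw [blistB_len]) (by omega)
      (le_trans (List.takeWhile_prefix _).length_le (by rw [blistB_len]))
  unfold solution_alt
  simp only [hL, hR, PySem.List.slice_natCast]
  rw [List.drop_take]

-- ===== VERDICT (by name: the statement is the Claim_ definition above) =====
theorem solution_spec : Claim_equal_solution := by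
  intro l r _
  unfold Spec_solution solution
  rw [solution_alt_eq]
  simp only [foldl_filter, List.nil_append]
  rw [show ((PySem.List.pyRange 0 64 1).map (fun i => 5 * pyBin i.toNat)) = blistB from rfl]
  rw [filter_eq_take_drop l r blistB blistB_sorted]
  rcases h : (blistB.take (blistB.takeWhile (fun v => v ≤ r)).length).drop
      (blistB.takeWhile (fun v => v < l)).length with _ | ⟨y, ys⟩ <;> simp
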